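-- pv_equiv track=rewrite | github.com/zeeshan4002911/DSA-reloaded | 1.data-structure/2.string/easy/substring-with-coreners-as-1s.py | binary_string
-- ===== SOURCE A (Python) =====
-- def binary_string(s):
--     size = len(s)
--     count_1s = 0
--     result = 0
--     # Counting the number of 1s from end and adding together for result
--     for i in range(size - 1, -1, -1):
--         if i == size - 1 and s[i] == "1":
--             count_1s += 1
--         elif s[i] == "1":
--             result += count_1s
--             count_1s += 1
--     return result
-- ===== SOURCE B (Python) =====
-- def binary_string(s):
--     k = s.count("1")
--     return k * (k - 1) // 2
-- ===== Notes on version B (the rewrite author's own statement) =====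
-- stated objective: simpler
-- what changed: Replaces the backwards index loop with its running count_1s/result accumulators by counting the 1s once and returning the closed-form pair count k*(k-1)//2.
import Mathlib
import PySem

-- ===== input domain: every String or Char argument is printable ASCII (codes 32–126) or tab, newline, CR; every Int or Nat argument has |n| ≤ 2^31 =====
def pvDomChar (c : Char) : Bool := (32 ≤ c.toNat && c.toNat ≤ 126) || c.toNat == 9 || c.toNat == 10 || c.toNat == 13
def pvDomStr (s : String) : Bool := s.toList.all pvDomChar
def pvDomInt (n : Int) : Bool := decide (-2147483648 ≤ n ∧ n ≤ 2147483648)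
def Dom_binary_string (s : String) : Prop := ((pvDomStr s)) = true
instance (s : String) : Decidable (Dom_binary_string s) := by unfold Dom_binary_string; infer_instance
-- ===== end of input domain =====

-- B replaces A's backwards index loop and running accumulators by counting the 1s once
-- and returning the closed-form pair count k*(k-1)//2 (objective: simpler).


-- ===== PORT A =====
-- size = len(s) is inlined (it is a pure local alias in A).
def binary_string (s : String) : Int :=
  ((PySem.List.pyRange (PySem.Str.len s - 1) (-1) (-1)).foldl
    (fun (st : Int × Int) i =>
      if i = PySem.Str.len s - 1 ∧ PySem.Str.pyGet? s i = some '1' then (st.1 + 1, st.2)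
      else if PySem.Str.pyGet? s i = some '1' then (st.1 + 1, st.2 + st.1)
      else st)
    ((0 : Int), (0 : Int))).2

-- ===== PORT B =====
def binary_string_alt (s : String) : Int :=
  let k : Int := (PySem.Str.count s "1" : Int)
  PySem.Int.floordiv (k * (k - 1)) 2

-- ===== PRECONDITION & SPEC =====
def Spec_binary_string (s : String) (out : Int) : Prop := out = binary_string_alt s
instance (s : String) (out : Int) : Decidable (Spec_binary_string s out) := by unfold Spec_binary_string; infer_instance

-- ===== CLAIM (what is proved, stated in full; the proofs are below) =====
def Claim_equal_binary_string : Prop := ∀ (s : String), Dom_binary_string s → Spec_binary_string s (binary_string s)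

-- ===== LEMMAS AND PROOFS =====

-- Python str.count with a single-character needle equals the character count.
lemma count_go_singleton (c : Char) : ∀ (fuel : Nat) (l : List Char) (acc : Nat),
    l.length ≤ fuel → PySem.Chars.count.go [c] fuel l acc = acc + l.count c := by
  intro fuel
  induction fuel with
  | zero => intro l acc h; cases l with
    | nil => simp [PySem.Chars.count.go]
    | cons a t => simp at h
  | succ n ih =>
    intro l acc h
    cases l with
    | nil => simp [PySem.Chars.count.go]
    | cons a t =>
      simp only [PySem.Chars.count.go]
      by_cases hac : c = a
      · subst hac
        simp [List.isPrefixOf, ih t (acc + 1) (by simpa using Nat.le_of_succ_le_succ h)]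
        omega
      · simp [List.isPrefixOf, hac, ih t acc (by simpa using Nat.le_of_succ_le_succ h), beq_iff_eq, Ne.symm hac]

lemma str_count_one (s : String) :
    PySem.Str.count s "1" = s.toList.count '1' := by
  rw [PySem.Str.count_eq]
  show PySem.Chars.count s.toList ['1'] = _
  unfold PySem.Chars.count
  simp only [List.isEmpty_cons, if_neg Bool.false_ne_true]
  rw [count_go_singleton '1' _ s.toList 0 (by simp)]
  simp

-- The uniform accumulator loop computes count and the triangular pair sum.
lemma uniform_fold (cs : List Char) : ∀ (c r : Int),
    cs.foldl (fun (st : Int × Int) ch =>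
      if ch = '1' then (st.1 + 1, st.2 + st.1) else st) (c, r)
    = (c + (cs.count '1' : Int),
       r + c * (cs.count '1' : Int) + ((cs.count '1').choose 2 : Int)) := by
  induction cs with
  | nil => intro c r; simp
  | cons a t ih =>
    intro c r
    by_cases h : a = '1'
    · subst h
      simp only [List.foldl_cons, ih]
      have hc : ('1' :: t).count '1' = t.count '1' + 1 := by simp
      have hch : (t.count '1' + 1).choose 2 = (t.count '1').choose 2 + t.count '1' := by
        rw [Nat.choose_succ_succ]
        simp [Nat.choose_one_right]
        omega
      rw [hc, hch]
      push_cast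
      ring
    · rw [List.foldl_cons, if_neg h, ih]
      simp [h]

-- The closed form k*(k-1)//2 is the binomial coefficient.
lemma floordiv_choose (k : Nat) :
    PySem.Int.floordiv ((k : Int) * ((k : Int) - 1)) 2 = (k.choose 2 : Int) := by
  cases k with
  | zero => decide
  | succ m =>
    have h1 : ((m + 1 : Nat) : Int) * (((m + 1 : Nat) : Int) - 1) = (((m + 1) * m : Nat) : Int) := by
      push_cast; ring
    have h2 : (2 : Int) = ((2 : Nat) : Int) := rfl
    rw [h1, h2, PySem.Int.floordiv_natCast]
    congr 1
    rw [Nat.choose_two_right]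
    simp

-- Folding A's body over the descending index range m-1 … 0 is the uniform fold over
-- the reversed first m characters (indices below size-1, so A's first branch is dead).
lemma desc_fold (s : String) (hm : ∀ i : Int, i ≤ (s.toList.length : Int) - 2 →
      ¬ (i = (PySem.Str.len s) - 1)) :
    ∀ (m : Nat), m ≤ s.toList.length → m + 1 ≤ s.toList.length → ∀ (st : Int × Int),
    (PySem.List.pyRange ((m : Int) - 1) (-1) (-1)).foldl
      (fun (st : Int × Int) i =>
        if i = (PySem.Str.len s) - 1 ∧ PySem.Str.pyGet? s i = some '1' then (st.1 + 1, st.2)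
        else if PySem.Str.pyGet? s i = some '1' then (st.1 + 1, st.2 + st.1)
        else st) st
    = ((s.toList.take m).reverse).foldl
      (fun (st : Int × Int) ch => if ch = '1' then (st.1 + 1, st.2 + st.1) else st) st := by
  intro m
  induction m with
  | zero =>
    intro _ _ st
    rw [PySem.List.pyRange_neg_one_eq_nil (by norm_num)]
    simp
  | succ n ih =>
    intro hle hle1 st
    rw [PySem.List.pyRange_neg_one_cons (by push_cast; omega)]
    have hgd : PySem.Str.pyGet? s ((n : Int) + 1 - 1) = s.toList[n]? := by
      have : ((n : Int) + 1 - 1) = (n : Int) := by ring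
      rw [this]
      simp
    have hget : s.toList[n]? = some (s.toList[n]'(by omega)) := by
      rw [List.getElem?_eq_getElem]
    have hnot : ¬ ((n : Int) + 1 - 1 = (PySem.Str.len s) - 1) := by
      apply hm; omega
    have htk : (s.toList.take (n + 1)).reverse
        = (s.toList[n]'(by omega)) :: (s.toList.take n).reverse := by
      rw [List.take_add_one, hget]
      simp
    push_cast
    rw [show ((n : Int) + 1 - 1 - 1) = (n : Int) - 1 by ring]
    rw [List.foldl_cons, if_neg (by intro hc; exact hnot hc.1)]
    push_cast at hgd
    rw [hgd, hget, htk, List.foldl_cons]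
    by_cases h1 : s.toList[n]'(by omega) = '1'
    · rw [if_pos (by simp [h1]), if_pos h1]
      have := ih (by omega) (by omega) (st.1 + 1, st.2 + st.1)
      push_cast at this
      exact this
    · rw [if_neg (by simp [h1]), if_neg h1]
      have := ih (by omega) (by omega) st
      push_cast at this
      exact this

-- ===== VERDICT (by name: the statement is the Claim_ definition above) =====
-- Pascal's rule at 2: (k+1 choose 2) = (k choose 2) + k.
lemma choose_succ_two (k : Nat) : (k + 1).choose 2 = k.choose 2 + k := by
  rw [Nat.choose_succ_succ]
  simp [Nat.choose_one_right]
  omega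

theorem binary_string_spec : Claim_equal_binary_string := by
  intro s _
  unfold Spec_binary_string binary_string binary_string_alt
  rw [str_count_one, floordiv_choose]
  have hlen : PySem.Str.len s = (s.toList.length : Int) := by simp
  cases hn : s.toList.length with
  | zero =>
    rw [PySem.List.pyRange_neg_one_eq_nil (by rw [hlen, hn]; norm_num)]
    have hcount : s.toList.count '1' = 0 := by
      rw [List.count_eq_zero]
      intro ha
      exact absurd (List.length_pos_of_mem ha) (by omega)
    simp [hcount]
  | succ m =>
    have hm : m < s.toList.length := by omega
    rw [PySem.List.pyRange_neg_one_cons (by rw [hlen, hn]; push_cast; omega)]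
    rw [show PySem.Str.len s - 1 - 1 = (m : Int) - 1 by rw [hlen, hn]; push_cast; ring]
    have hgd : PySem.Str.pyGet? s (PySem.Str.len s - 1) = some (s.toList[m]'hm) := by
      rw [show PySem.Str.len s - 1 = ((m : Nat) : Int) by rw [hlen, hn]; push_cast; ring]
      simp
    have hdesc := desc_fold s
      (by intro i hi hc; rw [hlen, hn] at hc; push_cast at hi hc; omega)
      m (by omega) (by omega)
    have hsplit : s.toList.count '1'
        = (s.toList.take m).count '1' + (if s.toList[m]'hm = '1' then 1 else 0) := by
      conv_lhs => rw [← List.take_append_drop m s.toList]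
      rw [List.count_append]
      congr 1
      rw [List.drop_eq_getElem_cons hm]
      rw [List.drop_of_length_le (by omega)]
      by_cases hx : s.toList[m]'hm = '1' <;> simp [hx]
    rw [List.foldl_cons]
    by_cases h1 : s.toList[m]'hm = '1'
    · rw [if_pos ⟨rfl, by rw [hgd, h1]⟩, hdesc, uniform_fold]
      rw [List.count_reverse, hsplit, if_pos h1]
      rw [choose_succ_two]
      push_cast
      ring
    · rw [if_neg (by rw [hgd]; simp [h1]), if_neg (by rw [hgd]; simp [h1])]
      rw [hdesc, uniform_fold]
      rw [List.count_reverse, hsplit, if_neg h1]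
      simp
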